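-- pv_equiv track=rewrite | github.com/udaykarthik4245/CN | cn/codes/cn (1).py | calculate_lrc
-- ===== SOURCE A (Python) =====
-- def calculate_lrc(datawords):
--     lrc = ''
--     for i in range(len(datawords[0])):
--         count = sum(int(d[i]) for d in datawords)
--         if count % 2 == 0:
--             lrc += '1'
--         else:
--             lrc += '0'
--     return lrc
-- ===== SOURCE B (Python) =====
-- def calculate_lrc(datawords):
--     n = len(datawords[0])
--
--     def row_parity(d):
--         return ''.join('1' if int(d[i]) % 2 != 0 else '0' for i in range(n))
--
--     acc = '0' * n
--     for d in datawords:
--         acc = ''.join('0' if a == b else '1' for a, b in zip(acc, row_parity(d)))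
--     return ''.join('1' if c == '0' else '0' for c in acc)
-- ===== Notes on version B (the rewrite author's own statement) =====
-- stated objective: alternative
-- what changed: Replaces A's per-column integer counting (one full scan of all datawords summing int(d[i]) per bit position) with a map-reduce over rows: each dataword is mapped to its digit-parity bit string, these strings are XOR-folded character-wise, and the accumulated string is complemented at the end; no counts or column sums are ever formed.
import Mathlib
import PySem

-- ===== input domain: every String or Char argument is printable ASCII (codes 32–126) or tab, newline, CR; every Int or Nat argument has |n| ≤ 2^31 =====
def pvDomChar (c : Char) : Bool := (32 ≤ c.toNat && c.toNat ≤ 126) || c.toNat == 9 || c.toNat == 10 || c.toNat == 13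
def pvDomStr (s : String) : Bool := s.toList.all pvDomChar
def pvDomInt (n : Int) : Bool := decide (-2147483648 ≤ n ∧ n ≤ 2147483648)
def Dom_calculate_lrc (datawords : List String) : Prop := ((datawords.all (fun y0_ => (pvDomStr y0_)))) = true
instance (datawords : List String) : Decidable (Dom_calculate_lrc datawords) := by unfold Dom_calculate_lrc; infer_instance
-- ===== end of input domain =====

-- B computes the same LRC by mapping each dataword to its digit-parity bit string,
-- XOR-folding those strings character-wise, and complementing the result — instead of
-- A's per-column integer counting (objective: alternative; same cost).

-- int(d[i]) of both Pythons; .getD 0 is unreachable inside Pre_ (in range, digit chars)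
def pvDigit (d : String) (i : Int) : Int :=
  ((PySem.Str.pyGet? d i).bind (fun c => PySem.Int.ofStr? (String.ofList [c]))).getD 0

-- ===== PORT A =====
def calculate_lrc (datawords : List String) : String :=
  (PySem.List.pyRange 0 ((datawords.headD "").length : Int) 1).foldl
    (fun lrc i =>
      let count := datawords.foldl (fun acc d => acc + pvDigit d i) 0
      if PySem.Int.mod count 2 = 0 then lrc ++ "1" else lrc ++ "0")
    ""

-- ===== PORT B =====
-- row_parity(d): the per-row digit-parity bit string
def pvRowParity (d : String) (n : Nat) : String :=
  String.ofList ((List.range n).map (fun (i : Nat) =>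
    if PySem.Int.mod (pvDigit d (i : Int)) 2 ≠ 0 then '1' else '0'))

def calculate_lrc_alt (datawords : List String) : String :=
  let n := (datawords.headD "").length
  let acc := datawords.foldl
    (fun acc d =>
      String.ofList ((acc.toList.zip (pvRowParity d n).toList).map
        (fun p => if p.1 = p.2 then '0' else '1')))
    (String.ofList (List.replicate n '0'))
  String.ofList (acc.toList.map (fun c => if c = '0' then '1' else '0'))

-- ===== PRECONDITION & SPEC =====
-- Pre_ excludes exactly the inputs where Python A raises: the empty list (datawords[0] is an
-- IndexError), datawords shorter than datawords[0] (IndexError), and non-digit characters in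
-- the first len(datawords[0]) columns (ValueError from int()).
def Pre_calculate_lrc (datawords : List String) : Prop :=
  datawords ≠ [] ∧
  (datawords.all (fun d =>
    decide ((datawords.headD "").toList.length ≤ d.toList.length) &&
    ((d.toList.take (datawords.headD "").toList.length).all
      (fun c => 48 ≤ c.toNat && c.toNat ≤ 57)))) = true
instance (datawords : List String) : Decidable (Pre_calculate_lrc datawords) := by
  unfold Pre_calculate_lrc; infer_instance
def pvWitness_calculate_lrc : List String := ["10", "11"]

def Spec_calculate_lrc (datawords : List String) (out : String) : Prop := out = calculate_lrc_alt datawords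
instance (datawords : List String) (out : String) : Decidable (Spec_calculate_lrc datawords out) := by unfold Spec_calculate_lrc; infer_instance

-- ===== CLAIM (what is proved, stated in full; the proofs are below) =====
def Claim_equal_calculate_lrc : Prop := ∀ (datawords : List String), Dom_calculate_lrc datawords → Pre_calculate_lrc datawords → Spec_calculate_lrc datawords (calculate_lrc datawords)

-- ===== LEMMAS AND PROOFS =====

-- the bit character '1'/'0' for an "odd" flag
def pvC (b : Bool) : Char := if b then '1' else '0'

-- column sum of digits over the datawords, the value A computes per column
def pvColSum (ds : List String) (i : Int) : Int :=
  ds.foldl (fun acc d => acc + pvDigit d i) 0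

-- parity ("is odd") of the column sum
def pvPar (ds : List String) (i : Int) : Bool :=
  decide (PySem.Int.mod (pvColSum ds i) 2 ≠ 0)

theorem pvColSum_cons (d : String) (ds : List String) (i : Int) :
    pvColSum (d :: ds) i = pvDigit d i + pvColSum ds i := by
  simp [pvColSum, PySem.List.foldl_add]

theorem pvPar_cons (d : String) (ds : List String) (i : Int) :
    pvPar (d :: ds) i
      = xor (decide (PySem.Int.mod (pvDigit d i) 2 ≠ 0)) (pvPar ds i) := by
  simp only [pvPar, pvColSum_cons,
    PySem.Int.mod_eq_emod_of_pos (show (0:Int) < 2 by omega)]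
  by_cases h1 : pvDigit d i % 2 = 0 <;> by_cases h2 : pvColSum ds i % 2 = 0 <;>
    simp [h1, h2] <;> omega

-- string-level fold of one-character appends, the shape of A's loop
theorem pvFoldStr (g : Nat → Char) (l : List Nat) (acc : String) :
    l.foldl (fun s k => s ++ String.ofList [g k]) acc = acc ++ String.ofList (l.map g) := by
  induction l generalizing acc with
  | nil => simp
  | cons a l ih => simp [ih, String.append_assoc, ← String.ofList_append]

theorem pvStr1 : String.ofList ['1'] = "1" := by decide
theorem pvStr0 : String.ofList ['0'] = "0" := by decide

-- A's fold in closed form: one parity character per column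
theorem pvA_closed (ds : List String) :
    calculate_lrc ds
      = String.ofList ((List.range (ds.headD "").length).map
          (fun (i : Nat) => pvC (! pvPar ds (i : Int)))) := by
  unfold calculate_lrc
  rw [PySem.List.pyRange_zero_natCast, List.foldl_map]
  refine Eq.trans (PySem.List.foldl_congr_mem _ _
    (fun (lrc : String) (k : Nat) => lrc ++ String.ofList [pvC (! pvPar ds (k : Int))]) "" ?_) ?_
  · intro acc k _
    show (if PySem.Int.mod (pvColSum ds (k : Int)) 2 = 0
        then acc ++ "1" else acc ++ "0")
      = acc ++ String.ofList [pvC (! pvPar ds (k : Int))]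
    by_cases h : PySem.Int.mod (pvColSum ds (k : Int)) 2 = 0
    · have hp : pvPar ds (k : Int) = false := by
        show decide (PySem.Int.mod (pvColSum ds (k : Int)) 2 ≠ 0) = false
        rw [h]; decide
      rw [if_pos h, hp, show pvC (!false) = '1' from rfl, pvStr1]
    · have hp : pvPar ds (k : Int) = true := decide_eq_true h
      rw [if_neg h, hp, show pvC (!true) = '0' from rfl, pvStr0]
  · rw [pvFoldStr]
    simp

-- B's XOR-fold invariant over the rows
theorem pvB_fold (n : Nat) (ds : List String) (p : Nat → Bool) :
    ds.foldl
      (fun acc d =>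
        String.ofList ((acc.toList.zip (pvRowParity d n).toList).map
          (fun q => if q.1 = q.2 then '0' else '1')))
      (String.ofList ((List.range n).map (fun (i : Nat) => pvC (p i))))
    = String.ofList ((List.range n).map
        (fun (i : Nat) => pvC (xor (p i) (pvPar ds (i : Int))))) := by
  induction ds generalizing p with
  | nil =>
    simp [pvPar, pvColSum]
  | cons d ds ih =>
    rw [List.foldl_cons]
    have hstep :
        String.ofList
            (((String.ofList ((List.range n).map (fun (i : Nat) => pvC (p i)))).toList.zip
                (pvRowParity d n).toList).map
              (fun q => if q.1 = q.2 then '0' else '1'))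
          = String.ofList ((List.range n).map
              (fun (i : Nat) =>
                pvC (xor (p i) (decide (PySem.Int.mod (pvDigit d (i : Int)) 2 ≠ 0))))) := by
      unfold pvRowParity
      rw [String.toList_ofList, String.toList_ofList, List.zip_map', List.map_map]
      congr 1
      refine List.map_congr_left fun i _ => ?_
      simp only [Function.comp]
      have hif : (if PySem.Int.mod (pvDigit d (i : Int)) 2 ≠ 0 then '1' else '0')
          = pvC (decide (PySem.Int.mod (pvDigit d (i : Int)) 2 ≠ 0)) := by
        by_cases hd : PySem.Int.mod (pvDigit d (i : Int)) 2 ≠ 0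
        · rw [if_pos hd, decide_eq_true hd]; rfl
        · rw [if_neg hd, decide_eq_false hd]; rfl
      simp only [hif]
      generalize p i = b
      generalize decide (PySem.Int.mod (pvDigit d (i : Int)) 2 ≠ 0) = rd
      cases b <;> cases rd <;> decide
    rw [hstep, ih]
    congr 1
    refine List.map_congr_left fun i _ => ?_
    rw [pvPar_cons, ← Bool.xor_assoc]

theorem calculate_lrc_eq (datawords : List String) :
    calculate_lrc datawords = calculate_lrc_alt datawords := by
  rw [pvA_closed]
  unfold calculate_lrc_alt
  show _ = String.ofList
    ((datawords.foldl
        (fun acc d =>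
          String.ofList ((acc.toList.zip
              (pvRowParity d (datawords.headD "").length).toList).map
            (fun p => if p.1 = p.2 then '0' else '1')))
        (String.ofList (List.replicate (datawords.headD "").length '0'))).toList.map
      (fun c => if c = '0' then '1' else '0'))
  have hrep : String.ofList (List.replicate (datawords.headD "").length '0')
      = String.ofList ((List.range (datawords.headD "").length).map
          (fun (_ : Nat) => pvC false)) := by
    simp [pvC]
  rw [hrep, pvB_fold _ datawords (fun _ => false)]
  simp only [Bool.false_xor]
  rw [String.toList_ofList, List.map_map]
  congr 1
  refine List.map_congr_left fun i _ => ?_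
  cases h : pvPar datawords (i : Int) <;> simp [pvC, Function.comp, h]

-- ===== VERDICT (by name: the statement is the Claim_ definition above) =====
theorem calculate_lrc_spec : Claim_equal_calculate_lrc := by
  intro datawords _ _
  exact calculate_lrc_eq datawords
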